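-- pv_equiv track=rewrite | github.com/GilCaplan/AOC23 | day14.py | tilt_left
-- ===== SOURCE A (Python) =====
-- def tilt_left(arr):
--     sorted_rocks = []
--     for col in arr:
--         sub_lists = ''.join(col).split('#')
--
--         sorted_sub_lists = []
--         for sub in sub_lists:
--             o_count = sum(1 for s in sub if s == 'O')
--             sorted_sublist = ['O'] * o_count + ['.'] * (len(sub) - o_count)
--             sorted_sub_lists.append(''.join(sorted_sublist))
--
--         sorted_rocks.append(['#'.join(sorted_sub_lists)])
--     return sorted_rocks
-- ===== SOURCE B (Python) =====
-- def tilt_left(arr):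
--     result = []
--     for col in arr:
--         buf = []
--         o_count = 0
--         seg_len = 0
--         for ch in ''.join(col):
--             if ch == '#':
--                 buf.append('O' * o_count + '.' * (seg_len - o_count))
--                 buf.append('#')
--                 o_count = 0
--                 seg_len = 0
--             else:
--                 seg_len += 1
--                 if ch == 'O':
--                     o_count += 1
--         buf.append('O' * o_count + '.' * (seg_len - o_count))
--         result.append([''.join(buf)])
--     return result
-- ===== Notes on version B (the rewrite author's own statement) =====
-- stated objective: alternative
-- what changed: Replaces join-then-split('#')-then-per-segment-count-and-rebuild with a single streaming pass over each column's characters that maintains two counters (O-count and segment length) and flushes a rebuilt segment at each '#' and at the end; it trades the intermediate segment lists for per-character state updates at the same asymptotic cost.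
import Mathlib
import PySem

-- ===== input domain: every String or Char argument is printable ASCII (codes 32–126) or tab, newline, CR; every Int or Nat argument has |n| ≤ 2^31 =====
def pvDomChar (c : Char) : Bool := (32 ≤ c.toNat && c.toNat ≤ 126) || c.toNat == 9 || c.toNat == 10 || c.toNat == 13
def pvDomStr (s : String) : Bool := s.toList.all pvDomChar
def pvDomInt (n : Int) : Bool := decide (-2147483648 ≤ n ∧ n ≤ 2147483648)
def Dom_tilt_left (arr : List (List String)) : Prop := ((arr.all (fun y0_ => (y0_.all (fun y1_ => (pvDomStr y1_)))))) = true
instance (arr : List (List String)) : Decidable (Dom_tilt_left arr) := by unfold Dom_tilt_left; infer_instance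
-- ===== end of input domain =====

-- B replaces join/split('#')/per-segment rebuild by one streaming pass per column with two counters (alternative decomposition, same cost; return value proved equal).

-- ===== PORT A =====
-- ''.join(col).split('#') ported on the List Char side (PySem.Chars.join / splitOn); the two
-- accumulator loops are the literal foldl of A's append loops.
def tilt_left (arr : List (List String)) : List (List String) :=
  arr.foldl (fun sorted_rocks col =>
    let sub_lists := PySem.Chars.splitOn (PySem.Chars.join [] (col.map String.toList)) ['#']
    let sorted_sub_lists := sub_lists.foldl (fun acc sub =>
      let o_count : Int := sub.foldl (fun n s => if s = 'O' then n + 1 else n) 0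
      let sorted_sublist := List.replicate o_count.toNat 'O' ++
        List.replicate ((sub.length : Int) - o_count).toNat '.'
      acc ++ [sorted_sublist]) []
    sorted_rocks ++ [[String.ofList (PySem.Chars.join ['#'] sorted_sub_lists)]]) []

-- ===== PORT B =====
-- the inner character loop of Source B: state = (buf, o_count, seg_len)
def tiltGoB : List Char → List Char → Nat → Nat → List Char
  | [], buf, o, seg => buf ++ (List.replicate o 'O' ++ List.replicate (seg - o) '.')
  | c :: rest, buf, o, seg =>
      if c = '#' then
        tiltGoB rest (buf ++ (List.replicate o 'O' ++ List.replicate (seg - o) '.') ++ ['#']) 0 0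
      else
        tiltGoB rest buf (if c = 'O' then o + 1 else o) (seg + 1)

def tilt_left_alt (arr : List (List String)) : List (List String) :=
  arr.foldl (fun result col =>
    result ++ [[String.ofList (tiltGoB (PySem.Chars.join [] (col.map String.toList)) [] 0 0)]]) []

-- ===== PRECONDITION & SPEC =====
def Spec_tilt_left (arr : List (List String)) (out : List (List String)) : Prop := out = tilt_left_alt arr
instance (arr : List (List String)) (out : List (List String)) : Decidable (Spec_tilt_left arr out) := by unfold Spec_tilt_left; infer_instance

-- ===== CLAIM (what is proved, stated in full; the proofs are below) =====
def Claim_equal_tilt_left : Prop := ∀ (arr : List (List String)), Dom_tilt_left arr → Spec_tilt_left arr (tilt_left arr)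

-- ===== LEMMAS AND PROOFS =====

-- structural single-char split on '#' (proved equal to PySem.Chars.splitOn below)
def split1 : List Char → List (List Char)
  | [] => [[]]
  | c :: cs => if c = '#' then [] :: split1 cs else (split1 cs).modifyHead (c :: ·)

theorem split1_ne_nil (cs : List Char) : split1 cs ≠ [] := by
  induction cs with
  | nil => simp [split1]
  | cons c cs ih =>
    simp only [split1]
    split_ifs
    · simp
    · cases h : split1 cs with
      | nil => exact absurd h ih
      | cons s t => simp

theorem go_spec : ∀ (fuel : Nat) (l cur : List Char) (acc : List (List Char)),
    l.length < fuel →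
    PySem.Chars.splitOn.go ['#'] fuel l cur acc =
      acc.reverse ++ (cur.reverse ++ (split1 l).headI) :: (split1 l).tail := by
  intro fuel
  induction fuel with
  | zero => intro l cur acc h; omega
  | succ f ih =>
    intro l cur acc h
    cases l with
    | nil => simp [PySem.Chars.splitOn.go, split1]
    | cons c rest =>
      by_cases hc : c = '#'
      · subst hc
        have hpre : List.isPrefixOf ['#'] ('#' :: rest) = true := by
          simp [List.isPrefixOf]
        rw [show PySem.Chars.splitOn.go ['#'] (f + 1) ('#' :: rest) cur acc =
            PySem.Chars.splitOn.go ['#'] f (List.drop 1 ('#' :: rest)) [] (cur.reverse :: acc) by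
          simp [PySem.Chars.splitOn.go, hpre]]
        simp only [List.drop_succ_cons, List.drop_zero]
        rw [ih rest [] (cur.reverse :: acc) (by simpa using h)]
        cases hs : split1 rest with
        | nil => exact absurd hs (split1_ne_nil rest)
        | cons s t => simp [split1, hs]
      · have hpre : List.isPrefixOf ['#'] (c :: rest) = false := by
          simp [List.isPrefixOf]
          intro hcontra; exact hc hcontra.symm
        rw [show PySem.Chars.splitOn.go ['#'] (f + 1) (c :: rest) cur acc =
            PySem.Chars.splitOn.go ['#'] f rest (c :: cur) acc by
          simp [PySem.Chars.splitOn.go, hpre]]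
        rw [ih rest (c :: cur) acc (by simpa using h)]
        cases hs : split1 rest with
        | nil => exact absurd hs (split1_ne_nil rest)
        | cons s t => simp [split1, hc, hs]

theorem splitOn_eq_split1 (cs : List Char) :
    PySem.Chars.splitOn cs ['#'] = split1 cs := by
  have h := go_spec (cs.length + 1) cs [] [] (by omega)
  rw [show PySem.Chars.splitOn cs ['#'] = PySem.Chars.splitOn.go ['#'] (cs.length + 1) cs [] [] from rfl, h]
  cases hs : split1 cs with
  | nil => exact absurd hs (split1_ne_nil cs)
  | cons s t => simp

-- rebuild of one finished segment
def rebuild (s : List Char) : List Char :=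
  List.replicate (s.countP (· = 'O')) 'O' ++ List.replicate (s.length - s.countP (· = 'O')) '.'

def tailJoin (rest : List (List Char)) : List Char :=
  rest.flatMap (fun r => '#' :: rebuild r)

theorem join_eq_tailJoin (x : List Char) (xs : List (List Char)) :
    PySem.Chars.join ['#'] ((x :: xs).map rebuild) = rebuild x ++ tailJoin xs := by
  induction xs generalizing x with
  | nil => simp [PySem.Chars.join_singleton, tailJoin]
  | cons y ys ih =>
    rw [List.map_cons, List.map_cons, PySem.Chars.join_cons_cons, ← List.map_cons]
    rw [ih y]
    simp [tailJoin]

-- B's loop with buf factored out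
theorem tiltGoB_buf (cs : List Char) : ∀ (buf : List Char) (o seg : Nat),
    tiltGoB cs buf o seg = buf ++ tiltGoB cs [] o seg := by
  induction cs with
  | nil => intro buf o seg; simp [tiltGoB]
  | cons c rest ih =>
    intro buf o seg
    simp only [tiltGoB]
    split_ifs with h
    · rw [ih]
      conv_rhs => rw [ih]
      simp
    all_goals exact ih buf _ _

-- generalized first segment: o O's and seg characters already consumed
def rebuild2 (o seg : Nat) (s : List Char) : List Char :=
  List.replicate (o + s.countP (· = 'O')) 'O' ++
    List.replicate ((seg + s.length) - (o + s.countP (· = 'O'))) '.'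

theorem tiltGoB_spec (cs : List Char) : ∀ (o seg : Nat),
    tiltGoB cs [] o seg = rebuild2 o seg (split1 cs).headI ++ tailJoin (split1 cs).tail := by
  induction cs with
  | nil => intro o seg; simp [tiltGoB, split1, rebuild2, tailJoin]
  | cons c rest ih =>
    intro o seg
    by_cases hc : c = '#'
    · subst hc
      rw [show tiltGoB ('#' :: rest) [] o seg =
          tiltGoB rest (([] : List Char) ++ (List.replicate o 'O' ++ List.replicate (seg - o) '.') ++ ['#']) 0 0 by
        simp [tiltGoB]]
      rw [tiltGoB_buf]
      rw [ih 0 0]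
      cases hs : split1 rest with
      | nil => exact absurd hs (split1_ne_nil rest)
      | cons s t =>
        simp [split1, hs, rebuild2, rebuild, tailJoin]
    · simp only [tiltGoB, if_neg hc]
      cases hs : split1 rest with
      | nil => exact absurd hs (split1_ne_nil rest)
      | cons s t =>
        have hhead : (split1 (c :: rest)).headI = c :: s := by
          simp [split1, hc, hs]
        have htail : (split1 (c :: rest)).tail = t := by
          simp [split1, hc, hs]
        rw [ih, hs, hhead, htail]
        simp only [List.headI_cons, List.tail_cons]
        congr 1
        unfold rebuild2
        by_cases hO : c = 'O'
        · simp [hO, List.length_cons]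
          congr 2 <;> omega
        · simp [hO, List.length_cons]
          omega

-- A's inner per-segment rebuild equals rebuild
theorem inner_eq_rebuild (sub : List Char) :
    (let o_count : Int := sub.foldl (fun n s => if s = 'O' then n + 1 else n) 0
     List.replicate o_count.toNat 'O' ++
       List.replicate ((sub.length : Int) - o_count).toNat '.') = rebuild sub := by
  have hc := PySem.List.foldl_count_if (fun s => s = 'O') sub 0
  simp only [decide_eq_true_eq] at hc
  have hle : sub.countP (fun s => decide (s = 'O')) ≤ sub.length := List.countP_le_length
  simp only [hc]
  unfold rebuild
  congr 1
  · congr 1; omega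
  · congr 1; omega

-- the whole column processed by A equals the whole column processed by B
theorem col_eq (cs : List Char) :
    PySem.Chars.join ['#']
      ((PySem.Chars.splitOn cs ['#']).foldl (fun acc sub =>
        let o_count : Int := sub.foldl (fun n s => if s = 'O' then n + 1 else n) 0
        let sorted_sublist := List.replicate o_count.toNat 'O' ++
          List.replicate ((sub.length : Int) - o_count).toNat '.'
        acc ++ [sorted_sublist]) []) = tiltGoB cs [] 0 0 := by
  rw [show ((PySem.Chars.splitOn cs ['#']).foldl (fun acc sub =>
        let o_count : Int := sub.foldl (fun n s => if s = 'O' then n + 1 else n) 0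
        let sorted_sublist := List.replicate o_count.toNat 'O' ++
          List.replicate ((sub.length : Int) - o_count).toNat '.'
        acc ++ [sorted_sublist]) []) =
      (PySem.Chars.splitOn cs ['#']).map rebuild by
    rw [show (PySem.Chars.splitOn cs ['#']).map rebuild =
        [] ++ (PySem.Chars.splitOn cs ['#']).map rebuild by simp]
    rw [← PySem.List.foldl_append_singleton_eq_map rebuild]
    apply PySem.List.foldl_congr_mem
    intro acc sub _
    simp only []
    rw [inner_eq_rebuild]]
  rw [splitOn_eq_split1, tiltGoB_spec]
  cases hs : split1 cs with
  | nil => exact absurd hs (split1_ne_nil cs)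
  | cons s t =>
    rw [join_eq_tailJoin]
    simp [rebuild2, rebuild]

-- ===== VERDICT (by name: the statement is the Claim_ definition above) =====
theorem tilt_left_spec : Claim_equal_tilt_left := by
  intro arr _
  unfold Spec_tilt_left tilt_left tilt_left_alt
  apply PySem.List.foldl_congr_mem
  intro acc col _
  simp only []
  rw [col_eq]
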